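-- pv_equiv track=rewrite | github.com/IISkylineIII/Rosalind | BA6E.Py | shared_kmers
-- ===== SOURCE A (Python) =====
-- def shared_kmers(k, s1, s2):
--     from collections import defaultdict
--
--     # Armazena as posições de todos os k-mers em s2
--     s2_kmers = defaultdict(list)
--     for j in range(len(s2) - k + 1):
--         kmer = s2[j:j+k]
--         s2_kmers[kmer].append(j)
--
--     result = []
--
--     for i in range(len(s1) - k + 1):
--         kmer = s1[i:i+k]
--         rev_kmer = reverse_complement(kmer)
--
--         # Verifica se o kmer ou seu reverso estão em s2
--         for j in s2_kmers.get(kmer, []):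
--             result.append((i, j))
--         for j in s2_kmers.get(rev_kmer, []):
--             result.append((i, j))
--
--     return result
--
-- def reverse_complement(seq):
--     complement = str.maketrans("ACGT", "TGCA")
--     return seq.translate(complement)[::-1]
-- ===== SOURCE B (Python) =====
-- def reverse_complement(seq):
--     complement = str.maketrans("ACGT", "TGCA")
--     return seq.translate(complement)[::-1]
--
-- def shared_kmers(k, s1, s2):
--     result = []
--     for i in range(len(s1) - k + 1):
--         kmer = s1[i:i+k]
--         rev_kmer = reverse_complement(kmer)
--         for j in range(len(s2) - k + 1):
--             if s2[j:j+k] == kmer: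
--                 result.append((i, j))
--         for j in range(len(s2) - k + 1):
--             if s2[j:j+k] == rev_kmer:
--                 result.append((i, j))
--     return result
-- ===== Notes on version B (the rewrite author's own statement) =====
-- stated objective: simpler
-- what changed: Removed the prebuilt defaultdict index of s2's k-mers: B directly rescans s2 with one inner loop for the forward k-mer and one for its reverse complement, preserving the exact output order.
import Mathlib
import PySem

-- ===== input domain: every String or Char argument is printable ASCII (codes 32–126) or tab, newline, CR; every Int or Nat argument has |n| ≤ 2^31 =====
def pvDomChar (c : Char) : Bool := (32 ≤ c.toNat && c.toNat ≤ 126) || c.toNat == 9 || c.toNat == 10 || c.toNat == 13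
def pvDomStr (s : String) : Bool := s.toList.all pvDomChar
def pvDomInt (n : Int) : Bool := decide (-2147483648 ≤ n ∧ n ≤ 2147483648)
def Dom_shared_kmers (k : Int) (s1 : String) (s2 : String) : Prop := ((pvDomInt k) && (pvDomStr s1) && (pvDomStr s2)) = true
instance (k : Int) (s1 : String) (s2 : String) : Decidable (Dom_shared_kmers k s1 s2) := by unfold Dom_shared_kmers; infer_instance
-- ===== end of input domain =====

-- B replaces A's prebuilt dict index of s2's k-mers by two direct rescans of s2 per position i (simpler, same output).


-- ===== PORT A =====
-- str.maketrans("ACGT","TGCA") + translate: exact per-character table, other characters unchanged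
def pvCompl (c : Char) : Char :=
  if c = 'A' then 'T' else if c = 'C' then 'G' else if c = 'G' then 'C' else if c = 'T' then 'A' else c

-- reverse_complement(seq) = seq.translate(complement)[::-1]; [::-1] is reverse (PySem.List.slice?_none_none_neg_one)
def pvRevComp (seq : List Char) : List Char := (seq.map pvCompl).reverse

def shared_kmers (k : Int) (s1 : String) (s2 : String) : List (Int × Int) :=
  let t1 := s1.toList
  let t2 := s2.toList
  -- s2_kmers = defaultdict(list); for j in range(len(s2)-k+1): s2_kmers[s2[j:j+k]].append(j)
  let s2_kmers := (PySem.List.pyRange 0 ((t2.length : Int) - k + 1) 1).foldl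
      (fun d j => d.modify (PySem.List.slice t2 (some j) (some (j + k))) [] (· ++ [j]))
      PySem.Dict.empty
  (PySem.List.pyRange 0 ((t1.length : Int) - k + 1) 1).foldl
    (fun result i =>
      let kmer := PySem.List.slice t1 (some i) (some (i + k))
      let rev_kmer := pvRevComp kmer
      let result := (s2_kmers.getD kmer []).foldl (fun r j => r ++ [(i, j)]) result
      (s2_kmers.getD rev_kmer []).foldl (fun r j => r ++ [(i, j)]) result)
    []

-- ===== PORT B =====
def shared_kmers_alt (k : Int) (s1 : String) (s2 : String) : List (Int × Int) :=
  let t1 := s1.toList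
  let t2 := s2.toList
  (PySem.List.pyRange 0 ((t1.length : Int) - k + 1) 1).foldl
    (fun result i =>
      let kmer := PySem.List.slice t1 (some i) (some (i + k))
      let rev_kmer := pvRevComp kmer
      let result := (PySem.List.pyRange 0 ((t2.length : Int) - k + 1) 1).foldl
        (fun r j => if PySem.List.slice t2 (some j) (some (j + k)) = kmer then r ++ [(i, j)] else r) result
      (PySem.List.pyRange 0 ((t2.length : Int) - k + 1) 1).foldl
        (fun r j => if PySem.List.slice t2 (some j) (some (j + k)) = rev_kmer then r ++ [(i, j)] else r) result)
    []

-- ===== PRECONDITION & SPEC =====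
def Spec_shared_kmers (k : Int) (s1 : String) (s2 : String) (out : List (Int × Int)) : Prop := out = shared_kmers_alt k s1 s2
instance (k : Int) (s1 : String) (s2 : String) (out : List (Int × Int)) : Decidable (Spec_shared_kmers k s1 s2 out) := by unfold Spec_shared_kmers; infer_instance

-- ===== CLAIM (what is proved, stated in full; the proofs are below) =====
def Claim_equal_shared_kmers : Prop := ∀ (k : Int) (s1 : String) (s2 : String), Dom_shared_kmers k s1 s2 → Spec_shared_kmers k s1 s2 (shared_kmers k s1 s2)

-- ===== LEMMAS AND PROOFS =====

-- A's index lookup is exactly the list of positions j whose slice equals the key, in ascending order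
theorem pv_getD_index (t2 : List Char) (k : Int) (key : List Char) :
    (((PySem.List.pyRange 0 ((t2.length : Int) - k + 1) 1).foldl
        (fun d j => d.modify (PySem.List.slice t2 (some j) (some (j + k))) [] (· ++ [j]))
        PySem.Dict.empty).getD key [])
      = (PySem.List.pyRange 0 ((t2.length : Int) - k + 1) 1).filter
          (fun j => PySem.List.slice t2 (some j) (some (j + k)) == key) := by
  have h := PySem.Dict.getD_foldl_modify_append
      (l := (PySem.List.pyRange 0 ((t2.length : Int) - k + 1) 1).map
        (fun j => (PySem.List.slice t2 (some j) (some (j + k)), j)))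
      (d := (PySem.Dict.empty : PySem.Dict (List Char) (List Int)))
      (c := key)
  rw [List.foldl_map] at h
  simpa [List.filter_map, Function.comp_def, List.map_map] using h

-- one forward/reverse pass: A's fold over the index list equals B's filtered rescan
theorem pv_pass_eq (t2 : List Char) (k : Int) (key : List Char) (i : Int) (r : List (Int × Int)) :
    (((PySem.List.pyRange 0 ((t2.length : Int) - k + 1) 1).foldl
        (fun d j => d.modify (PySem.List.slice t2 (some j) (some (j + k))) [] (· ++ [j]))
        PySem.Dict.empty).getD key []).foldl (fun r j => r ++ [(i, j)]) r
      = (PySem.List.pyRange 0 ((t2.length : Int) - k + 1) 1).foldl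
          (fun r j => if PySem.List.slice t2 (some j) (some (j + k)) = key then r ++ [(i, j)] else r) r := by
  rw [pv_getD_index, PySem.List.foldl_append_singleton_eq_map,
    PySem.List.foldl_append_ite (fun j => PySem.List.slice t2 (some j) (some (j + k)) = key)
      (fun j => (i, j)) _ r]
  refine congrArg (r ++ ·) (congrArg _ (List.filter_congr fun a _ => ?_))
  exact Bool.beq_eq_decide_eq _ key

theorem shared_kmers_spec : Claim_equal_shared_kmers := by
  intro k s1 s2 _
  unfold Spec_shared_kmers shared_kmers shared_kmers_alt
  dsimp only
  congr 1
  funext r i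
  simp only [pv_pass_eq]
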